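-- pv_equiv track=rewrite | github.com/brunotot/python-college-tasks | DZ3/zad7/zad7.py | matrix_open
-- ===== SOURCE A (Python) =====
-- cw = {
--     'RIGHT': 'DOWN',
--     'DOWN': 'LEFT',
--     'LEFT': 'UP',
--     'UP': 'RIGHT'
-- }
--
-- ccw = {
--     'RIGHT': 'UP',
--     'UP': 'LEFT',
--     'LEFT': 'DOWN',
--     'DOWN': 'RIGHT'
-- }
--
-- def indices_fw(row, col, looking_towards):
--     if looking_towards == 'UP':
--         return row - 1, col
--     elif looking_towards == 'LEFT':
--         return row, col - 1
--     elif looking_towards == 'DOWN':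
--         return row + 1, col
--     else:
--         return row, col + 1
--
-- def indices_ccw(row, col, looking_towards):
--     if looking_towards == 'UP':
--         return row, col - 1
--     elif looking_towards == 'LEFT':
--         return row + 1, col
--     elif looking_towards == 'DOWN':
--         return row, col + 1
--     else:
--         return row - 1, col
--
-- def is_valid(formatted_matrix, row, col, max_row, max_col):
--     return max_row > row >= 0 and max_col > col >= 0 and formatted_matrix[row][col] == '.'
--
-- def is_traversed_all_paths(row, col, start_row, start_col, looking_towards):
--     return ((row == start_row and col == start_col - 1 and looking_towards == 'RIGHT') or
--             (row == start_row and col == start_col + 1 and looking_towards == 'LEFT') or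
--             (row == start_row - 1 and col == start_col and looking_towards == 'DOWN') or
--             (row == start_row + 1 and col == start_col and looking_towards == 'UP'))
--
-- def is_exit_found(row, col, max_row, max_col):
--     return row == 0 or col == 0 or row == max_row - 1 or col == max_col - 1
--
-- def is_matrix_open(formatted_matrix, start_row, start_col, row, col, max_row, max_col, looking_towards):
--     if is_exit_found(row, col, max_row, max_col):
--         return True
--     elif is_traversed_all_paths(row, col, start_row, start_col, looking_towards):
--         return False
--     else:
--         ccw_row, ccw_col = indices_ccw(row, col, looking_towards)
--         if is_valid(formatted_matrix, ccw_row, ccw_col, max_row, max_col):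
--             return is_matrix_open(formatted_matrix, start_row, start_col, ccw_row, ccw_col, max_row, max_col, ccw[looking_towards])
--         else:
--             fw_row, fw_col = indices_fw(row, col, looking_towards)
--             if is_valid(formatted_matrix, fw_row, fw_col, max_row, max_col):
--                 return is_matrix_open(formatted_matrix, start_row, start_col, fw_row, fw_col, max_row, max_col, looking_towards)
--             else:
--                 return is_matrix_open(formatted_matrix, start_row, start_col, row, col, max_row, max_col, cw[looking_towards])
--
-- def format_matrix(old_matrix):
--     formatted_matrix = list(filter(lambda elem: elem != len(elem) * '.', old_matrix))
--     transposed_formatted_matrix = [''.join(tuples) for tuples in zip(*formatted_matrix)]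
--     transposed_formatted_matrix = list(filter(lambda elem: elem != len(elem) * '.', transposed_formatted_matrix))
--     formatted_matrix = list(filter(lambda elem: elem != len(elem) * '.', transposed_formatted_matrix))
--     return [''.join(tuples) for tuples in zip(*formatted_matrix)]
--
-- def matrix_open(old_matrix):
--     formatted_matrix = format_matrix(old_matrix)
--     asterisk_row = [x for x in formatted_matrix if '*' in x][0]
--     start_row, start_col = formatted_matrix.index(asterisk_row), asterisk_row.index('*')
--     current_row, current_col = start_row, start_col
--     max_row = len(formatted_matrix)
--     max_col = len(formatted_matrix[0])
--     return is_matrix_open(formatted_matrix, start_row, start_col, current_row, current_col, max_row, max_col, 'LEFT')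
-- ===== SOURCE B (Python) =====
-- # Iterative wall-follower with integer directions (0=UP,1=LEFT,2=DOWN,3=RIGHT, CCW order)
-- # and a single-pass matrix formatter that selects kept column indices directly.
--
-- _DR = (-1, 0, 1, 0)   # forward row delta for UP, LEFT, DOWN, RIGHT
-- _DC = (0, -1, 0, 1)   # forward col delta
--
--
-- def _format(old_matrix):
--     rows = [r for r in old_matrix if any(ch != '.' for ch in r)]
--     m = min((len(r) for r in rows), default=0)
--     cols = [j for j in range(m) if any(r[j] != '.' for r in rows)]
--     if not cols:
--         return []
--     return [''.join(r[j] for j in cols) for r in rows]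
--
--
-- def matrix_open(old_matrix):
--     fm = _format(old_matrix)
--     start = None
--     for i, row in enumerate(fm):
--         j = row.find('*')
--         if j >= 0:
--             start = (i, j)
--             break
--     if start is None:
--         raise IndexError("no start cell")
--     sr, sc = start
--     mr, mc = len(fm), len(fm[0])
--     r, c, d = sr, sc, 1  # looking LEFT
--     while True:
--         if r == 0 or c == 0 or r == mr - 1 or c == mc - 1:
--             return True
--         if r + _DR[d] == sr and c + _DC[d] == sc:
--             # about to face the start cell from an adjacent cell: all paths traversed
--             return False
--         t = (d + 1) % 4  # counter-clockwise turn
--         nr, nc = r + _DR[t], c + _DC[t]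
--         if 0 <= nr < mr and 0 <= nc < mc and fm[nr][nc] == '.':
--             r, c, d = nr, nc, t
--         else:
--             nr, nc = r + _DR[d], c + _DC[d]
--             if 0 <= nr < mr and 0 <= nc < mc and fm[nr][nc] == '.':
--                 r, c = nr, nc
--             else:
--                 d = (d - 1) % 4  # turn clockwise in place
-- ===== Notes on version B (the rewrite author's own statement) =====
-- stated objective: alternative
-- what changed: Replaces the recursive string-direction wall-follower (dict-based turns, per-direction index helpers) with an iterative while-loop over integer directions and delta tables, the traversed-all-paths test with a single 'forward cell is the start' check, and the filter/transpose/filter/transpose formatter with a one-pass row filter plus direct kept-column selection.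
import Mathlib
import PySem

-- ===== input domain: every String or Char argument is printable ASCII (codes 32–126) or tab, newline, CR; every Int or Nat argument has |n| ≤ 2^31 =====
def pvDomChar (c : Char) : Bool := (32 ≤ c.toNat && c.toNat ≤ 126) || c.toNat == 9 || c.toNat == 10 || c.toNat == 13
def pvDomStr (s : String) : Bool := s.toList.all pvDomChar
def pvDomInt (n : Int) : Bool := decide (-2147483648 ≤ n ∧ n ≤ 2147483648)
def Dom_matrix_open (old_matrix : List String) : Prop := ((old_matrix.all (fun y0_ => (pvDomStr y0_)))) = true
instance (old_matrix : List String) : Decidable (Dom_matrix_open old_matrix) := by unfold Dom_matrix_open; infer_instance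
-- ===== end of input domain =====

-- B replaces A's recursive string-direction wall-follower and double-transpose formatter by an
-- iterative loop over integer directions and a single-pass column-selecting formatter (objective: alternative).

-- ===== PORT A =====
-- Strings are processed as their character lists (exact: only per-character operations occur).

-- elem != len(elem) * '.'
def pvA_keep (s : List Char) : Bool := !(s == List.replicate s.length '.')

-- length of the shortest row (0 for []): the truncation Python's zip(*xs) performs
def pvA_minLen : List (List Char) → Nat
  | [] => 0
  | [s] => s.length
  | s :: rest => min s.length (pvA_minLen rest)

-- column j of xs (j < pvA_minLen xs whenever used)
def pvA_col (xs : List (List Char)) (j : Nat) : List Char := xs.map (fun s => s.getD j ' ')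

-- zip(*xs) followed by ''.join on each tuple: the list of columns, truncated to the shortest row (exact)
def pvA_zip (xs : List (List Char)) : List (List Char) :=
  (List.range (pvA_minLen xs)).map (pvA_col xs)

def pvA_format (old : List (List Char)) : List (List Char) :=
  let formatted := old.filter pvA_keep
  let transposed := (pvA_zip formatted).filter pvA_keep
  let formatted2 := transposed.filter pvA_keep   -- A filters the transposed matrix a second time
  pvA_zip formatted2

def pvA_cwD : PySem.Dict String String :=
  PySem.Dict.ofList [("RIGHT", "DOWN"), ("DOWN", "LEFT"), ("LEFT", "UP"), ("UP", "RIGHT")]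

def pvA_ccwD : PySem.Dict String String :=
  PySem.Dict.ofList [("RIGHT", "UP"), ("UP", "LEFT"), ("LEFT", "DOWN"), ("DOWN", "RIGHT")]

def pvA_indices_fw (row col : Int) (looking : String) : Int × Int :=
  if looking == "UP" then (row - 1, col)
  else if looking == "LEFT" then (row, col - 1)
  else if looking == "DOWN" then (row + 1, col)
  else (row, col + 1)

def pvA_indices_ccw (row col : Int) (looking : String) : Int × Int :=
  if looking == "UP" then (row, col - 1)
  else if looking == "LEFT" then (row + 1, col)
  else if looking == "DOWN" then (row, col + 1)
  else (row - 1, col)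

-- formatted_matrix[row][col]; only evaluated after the bounds checks, so getD defaults never fire
def pvA_cell (fm : List (List Char)) (row col : Int) : Char :=
  ((PySem.List.pyGet? fm row).getD []) |> fun s => (PySem.List.pyGet? s col).getD ' '

def pvA_valid (fm : List (List Char)) (row col mr mc : Int) : Bool :=
  decide (mr > row) && decide (row ≥ 0) && decide (mc > col) && decide (col ≥ 0) &&
    (pvA_cell fm row col == '.')

def pvA_trav (row col sr sc : Int) (looking : String) : Bool :=
  (decide (row = sr) && decide (col = sc - 1) && (looking == "RIGHT")) ||
  (decide (row = sr) && decide (col = sc + 1) && (looking == "LEFT")) ||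
  (decide (row = sr - 1) && decide (col = sc) && (looking == "DOWN")) ||
  (decide (row = sr + 1) && decide (col = sc) && (looking == "UP"))

def pvA_exit (row col mr mc : Int) : Bool :=
  decide (row = 0) || decide (col = 0) || decide (row = mr - 1) || decide (col = mc - 1)

-- is_matrix_open; the fuel argument only makes the recursion total: Python recurses forever
-- (RecursionError) exactly where the walk never reaches a terminal state, and 4·mr·mc+4 steps
-- visit every (row, col, direction) state, so fuel exhaustion happens only outside Pre_.
def pvA_go (fm : List (List Char)) (sr sc mr mc : Int) :
    Nat → Int → Int → String → Bool
  | 0, _, _, _ => false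
  | fuel + 1, row, col, looking =>
    if pvA_exit row col mr mc then true
    else if pvA_trav row col sr sc looking then false
    else
      let p := pvA_indices_ccw row col looking
      if pvA_valid fm p.1 p.2 mr mc then
        pvA_go fm sr sc mr mc fuel p.1 p.2 ((pvA_ccwD.get? looking).getD "")
      else
        let q := pvA_indices_fw row col looking
        if pvA_valid fm q.1 q.2 mr mc then
          pvA_go fm sr sc mr mc fuel q.1 q.2 looking
        else
          pvA_go fm sr sc mr mc fuel row col ((pvA_cwD.get? looking).getD "")

def matrix_open (old_matrix : List String) : Bool :=
  let fm := pvA_format (old_matrix.map String.toList)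
  match fm.filter (fun s => s.contains '*') with
  | [] => false   -- Python raises IndexError here ([...][0] on an empty list); outside Pre_
  | ar :: _ =>
    let sr : Int := ((PySem.List.index? fm ar).getD 0 : Nat)   -- fm.index(ar); ar ∈ fm, so never none
    let sc : Int := ((PySem.List.index? ar '*').getD 0 : Nat)  -- ar.index('*'); '*' ∈ ar, so never none
    let mr : Int := fm.length
    let mc : Int := (fm.headD []).length                       -- len(fm[0]); fm ≠ [] in this branch
    pvA_go fm sr sc mr mc (4 * fm.length * (fm.headD []).length + 4) sr sc "LEFT"

-- ===== PORT B =====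

def pvB_keepRow (s : List Char) : Bool := s.any (fun ch => !(ch == '.'))

-- min((len(r) for r in rows), default=0)
def pvB_minLen (rows : List (List Char)) : Nat :=
  match rows with
  | [] => 0
  | r :: rest => rest.foldl (fun acc s => min acc s.length) r.length

def pvB_format (old : List (List Char)) : List (List Char) :=
  let rows := old.filter pvB_keepRow
  let m := pvB_minLen rows
  let cols := (List.range m).filter (fun j => rows.any (fun r => !(r.getD j ' ' == '.')))
  if cols = [] then [] else rows.map (fun r => cols.map (fun j => r.getD j ' '))

-- row-major scan for the first '*' (row.find('*') per row, first hit wins)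
def pvB_findStar : List (List Char) → Option (Nat × Nat)
  | [] => none
  | r :: rest =>
    match PySem.List.index? r '*' with
    | some j => some (0, j)
    | none => (pvB_findStar rest).map (fun p => (p.1 + 1, p.2))

-- _DR[d], _DC[d]: forward deltas for d = 0 UP, 1 LEFT, 2 DOWN, 3 RIGHT
def pvB_dr (d : Int) : Int := (PySem.List.pyGet? [-1, 0, 1, 0] d).getD 0
def pvB_dc (d : Int) : Int := (PySem.List.pyGet? [0, -1, 0, 1] d).getD 0

def pvB_ok (fm : List (List Char)) (r c mr mc : Int) : Bool :=
  decide (0 ≤ r) && decide (r < mr) && decide (0 ≤ c) && decide (c < mc) &&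
    (((PySem.List.pyGet? fm r).getD [] |> fun s => (PySem.List.pyGet? s c).getD ' ') == '.')

-- the while-True loop; fuel only for totality (4·mr·mc+4 covers every state, see pvA_go)
def pvB_loop (fm : List (List Char)) (sr sc mr mc : Int) :
    Nat → Int → Int → Int → Bool
  | 0, _, _, _ => false
  | fuel + 1, r, c, d =>
    if decide (r = 0) || decide (c = 0) || decide (r = mr - 1) || decide (c = mc - 1) then true
    else if decide (r + pvB_dr d = sr) && decide (c + pvB_dc d = sc) then false
    else
      let t := PySem.Int.mod (d + 1) 4
      if pvB_ok fm (r + pvB_dr t) (c + pvB_dc t) mr mc then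
        pvB_loop fm sr sc mr mc fuel (r + pvB_dr t) (c + pvB_dc t) t
      else
        if pvB_ok fm (r + pvB_dr d) (c + pvB_dc d) mr mc then
          pvB_loop fm sr sc mr mc fuel (r + pvB_dr d) (c + pvB_dc d) d
        else
          pvB_loop fm sr sc mr mc fuel r c (PySem.Int.mod (d - 1) 4)

def matrix_open_alt (old_matrix : List String) : Bool :=
  let fm := pvB_format (old_matrix.map String.toList)
  match pvB_findStar fm with
  | none => false   -- Source B raises IndexError here; outside Pre_
  | some (sr, sc) =>
    pvB_loop fm sr sc fm.length (fm.headD []).length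
      (4 * fm.length * (fm.headD []).length + 4) sr sc 1

-- ===== PRECONDITION & SPEC =====
-- Pre_ excludes exactly the inputs on which Python A raises: IndexError when no '*' survives
-- formatting, and RecursionError when the wall-follower walk never reaches a terminal state
-- (the walk is deterministic over 4·mr·mc states, so termination = a terminal within 4·mr·mc+4 steps).
-- Which walks terminate has no non-algorithmic shape characterisation, so Pre_ runs an independent
-- bounded walk (a third implementation sharing no definition with either port); it admits exactly
-- the inputs on which A returns and excludes exactly those on which A raises.

def pvPre_rows (old : List String) : List (List Char) :=
  (old.map String.toList).filter (fun s => ¬ s.all (· = '.'))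

def pvPre_fmt (old : List String) : List (List Char) :=
  let rows := pvPre_rows old
  let m := (rows.map List.length).foldr min (rows.headD []).length
  let cols := (List.range m).filter (fun j => ¬ rows.all (fun r => r.getD j ' ' = '.'))
  if cols.isEmpty then [] else rows.map (fun r => cols.map (fun j => r.getD j ' '))

def pvPre_star (fm : List (List Char)) : Option (Nat × Nat) :=
  match fm.findIdx? (fun r => '*' ∈ r) with
  | none => none
  | some i => some (i, (fm.getD i []).idxOf '*')

-- one step of the walk; state (r, c, d) with d = 0 UP, 1 LEFT, 2 DOWN, 3 RIGHT
def pvPre_step (fm : List (List Char)) (mr mc : Nat) (s : Int × Int × Int) : Int × Int × Int :=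
  let (r, c, d) := s
  let dr := fun (k : Int) => if k = 0 then (-1 : Int) else if k = 2 then 1 else 0
  let dc := fun (k : Int) => if k = 1 then (-1 : Int) else if k = 3 then 1 else 0
  let ok := fun (i j : Int) =>
    0 ≤ i ∧ i < (mr : Int) ∧ 0 ≤ j ∧ j < (mc : Int) ∧
      ((fm.getD i.toNat []).getD j.toNat ' ') = '.'
  let t := (d + 1) % 4
  if ok (r + dr t) (c + dc t) then (r + dr t, c + dc t, t)
  else if ok (r + dr d) (c + dc d) then (r + dr d, c + dc d, d)
  else (r, c, (d + 3) % 4)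

def pvPre_terminal (mr mc : Nat) (sr sc : Int) (s : Int × Int × Int) : Bool :=
  let (r, c, d) := s
  let dr := fun (k : Int) => if k = 0 then (-1 : Int) else if k = 2 then 1 else 0
  let dc := fun (k : Int) => if k = 1 then (-1 : Int) else if k = 3 then 1 else 0
  decide (r = 0) || decide (c = 0) || decide (r = (mr : Int) - 1) || decide (c = (mc : Int) - 1) ||
    (decide (r + dr d = sr) && decide (c + dc d = sc))

def pvPre_reaches (fm : List (List Char)) (mr mc : Nat) (sr sc : Int) :
    Nat → (Int × Int × Int) → Bool
  | 0, _ => false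
  | fuel + 1, s =>
    pvPre_terminal mr mc sr sc s || pvPre_reaches fm mr mc sr sc fuel (pvPre_step fm mr mc s)

def pvPre_check (old_matrix : List String) : Bool :=
  match pvPre_star (pvPre_fmt old_matrix) with
  | none => false
  | some (i, j) =>
    let fm := pvPre_fmt old_matrix
    let mr := fm.length
    let mc := (fm.headD []).length
    pvPre_reaches fm mr mc i j (4 * mr * mc + 4) ((i : Int), (j : Int), 1)

def Pre_matrix_open (old_matrix : List String) : Prop := pvPre_check old_matrix = true

instance (old_matrix : List String) : Decidable (Pre_matrix_open old_matrix) := by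
  unfold Pre_matrix_open; infer_instance

def pvWitness_matrix_open : List String := ["***", "*.*", "***"]

def Spec_matrix_open (old_matrix : List String) (out : Bool) : Prop := out = matrix_open_alt old_matrix
instance (old_matrix : List String) (out : Bool) : Decidable (Spec_matrix_open old_matrix out) := by unfold Spec_matrix_open; infer_instance

-- ===== CLAIM (what is proved, stated in full; the proofs are below) =====
def Claim_equal_matrix_open : Prop := ∀ (old_matrix : List String), Dom_matrix_open old_matrix → Pre_matrix_open old_matrix → Spec_matrix_open old_matrix (matrix_open old_matrix)

-- ===== LEMMAS AND PROOFS =====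

theorem pv_bool_eq_of_iff {a b : Bool} (h : a = true ↔ b = true) : a = b := by
  cases a <;> cases b <;> simp_all

theorem pv_keep_eq (s : List Char) : pvA_keep s = pvB_keepRow s := by
  induction s with
  | nil => decide
  | cons a t ih =>
    by_cases h : a = '.'
    · subst h
      simp only [pvA_keep, pvB_keepRow, List.length_cons, List.replicate_succ,
        List.any_cons, List.cons_beq_cons, beq_self_eq_true, Bool.true_and, Bool.not_true,
        Bool.false_or] at ih ⊢
      exact ih
    · have ha : (a == '.') = false := by simp [h]
      simp [pvA_keep, pvB_keepRow, ha, List.replicate_succ]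

theorem pv_foldl_min (l : List (List Char)) (a : Nat) :
    l.foldl (fun acc s => min acc s.length) a
      = match l with | [] => a | _ :: _ => min a (pvA_minLen l) := by
  induction l generalizing a with
  | nil => rfl
  | cons s rest ih =>
    cases rest with
    | nil => simp [List.foldl, pvA_minLen]
    | cons r t =>
      show (List.foldl _ (min a s.length) (r :: t)) = _
      rw [ih]
      simp only [pvA_minLen]
      omega

theorem pv_min_eq (rows : List (List Char)) : pvB_minLen rows = pvA_minLen rows := by
  cases rows with
  | nil => rfl
  | cons r rest =>
    show rest.foldl (fun acc s => min acc s.length) r.length = _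
    rw [pv_foldl_min]
    cases rest with
    | nil => simp [pvA_minLen]
    | cons x t => simp only [pvA_minLen]

theorem pv_minLen_const (l : List (List Char)) (n : Nat)
    (hne : l ≠ []) (h : ∀ x ∈ l, x.length = n) : pvA_minLen l = n := by
  induction l with
  | nil => simp at hne
  | cons s rest ih =>
    cases rest with
    | nil => simpa [pvA_minLen] using h s (by simp)
    | cons r t =>
      have h2 := ih (by simp) (fun x hx => h x (List.mem_cons_of_mem _ hx))
      have h1 : s.length = n := h s (by simp)
      show min s.length (pvA_minLen (r :: t)) = n
      rw [h1, h2]; omega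

theorem pv_getD_map (f : List Char → Char) (l : List (List Char)) (i : Nat)
    (hi : i < l.length) (d : Char) :
    (l.map f).getD i d = f (l[i]) := by
  rw [List.getD_eq_getElem?_getD, List.getElem?_map, List.getElem?_eq_getElem hi]
  rfl

theorem pv_format_eq (old : List (List Char)) : pvA_format old = pvB_format old := by
  have hk : pvB_keepRow = pvA_keep := funext fun s => (pv_keep_eq s).symm
  simp only [pvA_format, pvB_format, pv_min_eq, hk]
  set rows := old.filter pvA_keep with hrows
  set m := pvA_minLen rows with hm
  have hff : ((pvA_zip rows).filter pvA_keep).filter pvA_keep = (pvA_zip rows).filter pvA_keep := by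
    rw [List.filter_filter]
    exact List.filter_congr (fun x _ => Bool.and_self _)
  rw [hff]
  have hcolf : (pvA_zip rows).filter pvA_keep
      = ((List.range m).filter (fun j => rows.any (fun r => !(r.getD j ' ' == '.')))).map
          (pvA_col rows) := by
    unfold pvA_zip
    rw [← hm, List.filter_map]
    congr 1
    refine List.filter_congr (fun j _ => ?_)
    show pvA_keep (pvA_col rows j) = _
    rw [pv_keep_eq]
    simp [pvB_keepRow, pvA_col, List.any_map, Function.comp_def]
  rw [hcolf]
  set cols := (List.range m).filter (fun j => rows.any (fun r => !(r.getD j ' ' == '.'))) with hcols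
  by_cases hc : cols = []
  · simp [hc, pvA_zip, pvA_minLen]
  · rw [if_neg hc]
    have hlen : pvA_minLen (cols.map (pvA_col rows)) = rows.length := by
      refine pv_minLen_const _ _ (by simpa using hc) ?_
      intro x hx
      simp only [List.mem_map] at hx
      obtain ⟨j, _, rfl⟩ := hx
      simp [pvA_col]
    unfold pvA_zip
    rw [hlen]
    apply List.ext_getElem
    · simp
    · intro i h1 h2
      simp only [List.getElem_map, List.getElem_range, pvA_col, List.map_map]
      have hi : i < rows.length := by simpa using h2
      refine List.map_congr_left (fun j _ => ?_)
      show (rows.map (fun s => s.getD j ' ')).getD i ' ' = _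
      rw [pv_getD_map _ _ _ hi]

theorem pv_star_none (fm : List (List Char)) (h : fm.filter (fun s => s.contains '*') = []) :
    pvB_findStar fm = none := by
  induction fm with
  | nil => rfl
  | cons r rest ih =>
    rw [List.filter_cons] at h
    by_cases hr : r.contains '*' = true
    · rw [if_pos hr] at h; simp at h
    · rw [if_neg hr] at h
      have hnone : PySem.List.index? r '*' = none := by
        rw [PySem.List.index?_eq_none_iff]
        simpa using hr
      simp only [pvB_findStar, hnone, ih h, Option.map_none]

theorem pv_star_cons (fm : List (List Char)) (ar : List Char) (rest : List (List Char))
    (h : fm.filter (fun s => s.contains '*') = ar :: rest) :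
    pvB_findStar fm = some ((PySem.List.index? fm ar).getD 0, (PySem.List.index? ar '*').getD 0) := by
  induction fm generalizing ar rest with
  | nil => simp at h
  | cons r t ih =>
    rw [List.filter_cons] at h
    by_cases hr : r.contains '*' = true
    · rw [if_pos hr] at h
      injection h with h1 h2
      subst h1
      have hmem : '*' ∈ r := by simpa using hr
      obtain ⟨j, hj⟩ := Option.isSome_iff_exists.mp ((PySem.List.index?_isSome_iff r '*').mpr hmem)
      simp only [pvB_findStar, hj, PySem.List.index?_cons_self, Option.getD_some]
    · rw [if_neg hr] at h
      have har : '*' ∈ ar := by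
        have hmf : ar ∈ t.filter (fun s => s.contains '*') := h ▸ List.mem_cons_self ..
        simpa using (List.of_mem_filter hmf)
      have hat : ar ∈ t := List.mem_of_mem_filter (h ▸ List.mem_cons_self ..)
      have hne : r ≠ ar := fun e => by subst e; exact hr (by simpa using har)
      have hnone : PySem.List.index? r '*' = none := by
        rw [PySem.List.index?_eq_none_iff]; simpa using hr
      obtain ⟨k, hk⟩ := Option.isSome_iff_exists.mp ((PySem.List.index?_isSome_iff t ar).mpr hat)
      have hcons : PySem.List.index? (r :: t) ar = some (k + 1) := by
        rw [PySem.List.index?_cons_of_ne t hne, hk]; rfl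
      simp only [pvB_findStar, hnone, ih ar rest h, hcons, hk, Option.map_some, Option.getD_some]

def pvEnc (d : Int) : String :=
  if d = 0 then "UP" else if d = 1 then "LEFT" else if d = 2 then "DOWN" else "RIGHT"

theorem pv_ok_eq (fm : List (List Char)) (r c mr mc : Int) :
    pvB_ok fm r c mr mc = pvA_valid fm r c mr mc := by
  apply pv_bool_eq_of_iff
  simp only [pvB_ok, pvA_valid, pvA_cell, Bool.and_eq_true, decide_eq_true_eq]
  tauto

theorem pv_walk_eq (fm : List (List Char)) (sr sc mr mc : Int) (fuel : Nat) :
    ∀ r c d : Int, (d = 0 ∨ d = 1 ∨ d = 2 ∨ d = 3) →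
      pvA_go fm sr sc mr mc fuel r c (pvEnc d) = pvB_loop fm sr sc mr mc fuel r c d := by
  induction fuel with
  | zero => intro r c d hd; rfl
  | succ n ih =>
    intro r c d hd
    have hexit : ∀ (x y : Int), pvA_exit x y mr mc
        = (decide (x = 0) || decide (y = 0) || decide (x = mr - 1) || decide (y = mc - 1)) :=
      fun _ _ => rfl
    rcases hd with rfl | rfl | rfl | rfl
    -- d = 0, "UP"
    · show pvA_go fm sr sc mr mc (n+1) r c "UP" = pvB_loop fm sr sc mr mc (n+1) r c 0
      simp only [pvA_go, pvB_loop]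
      rw [show PySem.Int.mod ((0:Int) + 1) 4 = 1 from by decide,
          show PySem.Int.mod ((0:Int) - 1) 4 = 3 from by decide,
          show pvB_dr 1 = 0 from by decide, show pvB_dc 1 = -1 from by decide,
          show pvB_dr 0 = -1 from by decide, show pvB_dc 0 = 0 from by decide]
      rw [show pvA_indices_ccw r c "UP" = (r, c - 1) from rfl,
          show pvA_indices_fw r c "UP" = (r - 1, c) from rfl,
          show (pvA_ccwD.get? "UP").getD "" = "LEFT" from by decide,
          show (pvA_cwD.get? "UP").getD "" = "RIGHT" from by decide]
      rw [show r + (0:Int) = r from by ring, show c + (-1:Int) = c - 1 from by ring,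
          show r + (-1:Int) = r - 1 from by ring, show c + (0:Int) = c from by ring]
      rw [show pvA_trav r c sr sc "UP" = (decide (r - 1 = sr) && decide (c = sc)) from
            pv_bool_eq_of_iff (by simp [pvA_trav]; omega)]
      simp only [pv_ok_eq, hexit]
      split_ifs <;> first
        | rfl
        | exact ih r (c - 1) 1 (by omega)
        | exact ih (r - 1) c 0 (by omega)
        | exact ih r c 3 (by omega)
    -- d = 1, "LEFT"
    · show pvA_go fm sr sc mr mc (n+1) r c "LEFT" = pvB_loop fm sr sc mr mc (n+1) r c 1
      simp only [pvA_go, pvB_loop]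
      rw [show PySem.Int.mod ((1:Int) + 1) 4 = 2 from by decide,
          show PySem.Int.mod ((1:Int) - 1) 4 = 0 from by decide,
          show pvB_dr 2 = 1 from by decide, show pvB_dc 2 = 0 from by decide,
          show pvB_dr 1 = 0 from by decide, show pvB_dc 1 = -1 from by decide]
      rw [show pvA_indices_ccw r c "LEFT" = (r + 1, c) from rfl,
          show pvA_indices_fw r c "LEFT" = (r, c - 1) from rfl,
          show (pvA_ccwD.get? "LEFT").getD "" = "DOWN" from by decide,
          show (pvA_cwD.get? "LEFT").getD "" = "UP" from by decide]
      rw [show c + (0:Int) = c from by ring, show c + (-1:Int) = c - 1 from by ring,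
          show r + (0:Int) = r from by ring]
      rw [show pvA_trav r c sr sc "LEFT" = (decide (r = sr) && decide (c - 1 = sc)) from
            pv_bool_eq_of_iff (by simp [pvA_trav]; omega)]
      simp only [pv_ok_eq, hexit]
      split_ifs <;> first
        | rfl
        | exact ih (r + 1) c 2 (by omega)
        | exact ih r (c - 1) 1 (by omega)
        | exact ih r c 0 (by omega)
    -- d = 2, "DOWN"
    · show pvA_go fm sr sc mr mc (n+1) r c "DOWN" = pvB_loop fm sr sc mr mc (n+1) r c 2
      simp only [pvA_go, pvB_loop]
      rw [show PySem.Int.mod ((2:Int) + 1) 4 = 3 from by decide,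
          show PySem.Int.mod ((2:Int) - 1) 4 = 1 from by decide,
          show pvB_dr 3 = 0 from by decide, show pvB_dc 3 = 1 from by decide,
          show pvB_dr 2 = 1 from by decide, show pvB_dc 2 = 0 from by decide]
      rw [show pvA_indices_ccw r c "DOWN" = (r, c + 1) from rfl,
          show pvA_indices_fw r c "DOWN" = (r + 1, c) from rfl,
          show (pvA_ccwD.get? "DOWN").getD "" = "RIGHT" from by decide,
          show (pvA_cwD.get? "DOWN").getD "" = "LEFT" from by decide]
      rw [show r + (0:Int) = r from by ring, show c + (0:Int) = c from by ring]
      rw [show pvA_trav r c sr sc "DOWN" = (decide (r + 1 = sr) && decide (c = sc)) from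
            pv_bool_eq_of_iff (by simp [pvA_trav]; omega)]
      simp only [pv_ok_eq, hexit]
      split_ifs <;> first
        | rfl
        | exact ih r (c + 1) 3 (by omega)
        | exact ih (r + 1) c 2 (by omega)
        | exact ih r c 1 (by omega)
    -- d = 3, "RIGHT"
    · show pvA_go fm sr sc mr mc (n+1) r c "RIGHT" = pvB_loop fm sr sc mr mc (n+1) r c 3
      simp only [pvA_go, pvB_loop]
      rw [show PySem.Int.mod ((3:Int) + 1) 4 = 0 from by decide,
          show PySem.Int.mod ((3:Int) - 1) 4 = 2 from by decide,
          show pvB_dr 0 = -1 from by decide, show pvB_dc 0 = 0 from by decide,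
          show pvB_dr 3 = 0 from by decide, show pvB_dc 3 = 1 from by decide]
      rw [show pvA_indices_ccw r c "RIGHT" = (r - 1, c) from rfl,
          show pvA_indices_fw r c "RIGHT" = (r, c + 1) from rfl,
          show (pvA_ccwD.get? "RIGHT").getD "" = "UP" from by decide,
          show (pvA_cwD.get? "RIGHT").getD "" = "DOWN" from by decide]
      rw [show r + (-1:Int) = r - 1 from by ring, show c + (0:Int) = c from by ring,
          show r + (0:Int) = r from by ring]
      rw [show pvA_trav r c sr sc "RIGHT" = (decide (r = sr) && decide (c + 1 = sc)) from
            pv_bool_eq_of_iff (by simp [pvA_trav]; omega)]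
      simp only [pv_ok_eq, hexit]
      split_ifs <;> first
        | rfl
        | exact ih (r - 1) c 0 (by omega)
        | exact ih r (c + 1) 3 (by omega)
        | exact ih r c 2 (by omega)

-- ===== VERDICT (by name: the statement is the Claim_ definition above) =====
theorem matrix_open_spec : Claim_equal_matrix_open := by
  intro old _ _
  unfold Spec_matrix_open matrix_open matrix_open_alt
  simp only [pv_format_eq]
  cases h : (pvB_format (old.map String.toList)).filter (fun s => s.contains '*') with
  | nil => simp only [pv_star_none _ h]
  | cons ar rest =>
    simp only [pv_star_cons _ _ _ h]
    exact pv_walk_eq _ _ _ _ _ _ _ _ 1 (by omega)
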